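-- pv_equiv track=rewrite | github.com/liuben10/programming_practice_problems | minimum_rooted_tree.py | minimum_rooted_tree
-- ===== SOURCE A (Python) =====
-- def height(root, edges):
--     height = 0
--     explore = [(root, 0)]
--     visited = {}
--     max_height = float('-inf')
--     while explore:
--         (node, height) = explore.pop(0)
--         visited[node] = 1
--         if (height > max_height):
--             max_height = height
--         succ = [e[1] for e in edges if e[0] == node]
--         succ.extend([e[0] for e in edges if e[1] == node])
--         for s in succ:
--             if s not in visited:
--                 explore.append((s, height+1))
--     return max_height
--
-- def minimum_rooted_tree(nodes, edges):
--     min_height = float('inf')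
--     minimum_rooted_nodes = []
--     for i in range(nodes):
--         curh = height(i, edges)
--         if (curh < min_height):
--             min_height = curh
--             minimum_rooted_nodes = [i]
--         elif curh == min_height:
--             minimum_rooted_nodes.append(i)
--     return minimum_rooted_nodes
-- ===== SOURCE B (Python) =====
-- def minimum_rooted_tree(nodes, edges):
--     # Build adjacency once (outgoing and incoming kept separate to preserve
--     # the exact successor order A produces), then BFS from each root with an
--     # index cursor instead of list.pop(0); finally pick the minimizers by a
--     # min + filter pass instead of A's running-min accumulator.
--     out_adj = {}
--     in_adj = {}
--     for a, b in edges: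
--         out_adj.setdefault(a, []).append(b)
--         in_adj.setdefault(b, []).append(a)
--
--     def ecc(root):
--         queue = [(root, 0)]
--         i = 0
--         visited = set()
--         best = 0
--         while i < len(queue):
--             node, h = queue[i]
--             i += 1
--             visited.add(node)
--             if h > best:
--                 best = h
--             for s in out_adj.get(node, []) + in_adj.get(node, []):
--                 if s not in visited:
--                     queue.append((s, h + 1))
--         return best
--
--     if nodes <= 0:
--         return []
--     heights = [ecc(r) for r in range(nodes)]
--     m = min(heights)
--     return [i for i, h in enumerate(heights) if h == m]
-- ===== Notes on version B (the rewrite author's own statement) =====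
-- stated objective: faster
-- what changed: B builds outgoing/incoming adjacency dicts once so A's two full edge-list scans per BFS pop disappear, walks the queue with an index cursor instead of quadratic list.pop(0), and selects the minimum-height roots with a min+filter pass over a heights list instead of A's running-min accumulator loop.
import Mathlib
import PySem

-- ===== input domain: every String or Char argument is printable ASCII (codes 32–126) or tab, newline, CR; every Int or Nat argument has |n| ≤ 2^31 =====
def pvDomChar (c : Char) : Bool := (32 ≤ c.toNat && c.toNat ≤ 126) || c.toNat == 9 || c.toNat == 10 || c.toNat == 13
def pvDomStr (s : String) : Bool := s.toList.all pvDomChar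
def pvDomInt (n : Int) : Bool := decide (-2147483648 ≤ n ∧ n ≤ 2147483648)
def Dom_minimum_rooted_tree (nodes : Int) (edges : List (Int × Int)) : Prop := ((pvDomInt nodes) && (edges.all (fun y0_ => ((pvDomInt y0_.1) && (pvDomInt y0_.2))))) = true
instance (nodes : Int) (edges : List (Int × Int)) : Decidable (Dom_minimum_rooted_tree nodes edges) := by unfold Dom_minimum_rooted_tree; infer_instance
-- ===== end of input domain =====

-- B builds the adjacency once (so A's per-pop scans of the whole edge list disappear)
-- and selects the minimum-height roots with a min+filter pass instead of A's running-min
-- accumulator; the BFS queue discipline itself is unchanged.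

-- Fuel shared by both loop ports: Python's `while explore:` always terminates (each
-- enqueue targets a not-yet-visited node, and enqueues of the k-th first-visited node
-- are bounded by the pops before it, giving ≤ 2^(distinct nodes) ≤ 2^(2E+1) pops in
-- total), so this fuel is never exhausted; it is a totality guard only.
def pvFuel (edges : List (Int × Int)) : Nat := 2 ^ (2 * edges.length + 2)

-- ===== PORT A =====
-- while explore: pop(0); visited[node]=1; update max; succ by scanning edges; enqueue unvisited
def pvHeightLoopA (edges : List (Int × Int)) :
    Nat → List (Int × Int) → PySem.Dict Int Int → Option Int → Option Int
  | 0, _, _, maxh => maxh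
  | fuel + 1, explore, visited, maxh =>
    match explore with
    | [] => maxh
    | (node, h) :: rest =>
      let visited := visited.insert node 1
      -- max_height starts at float('-inf'): ported as `none`, below every Int
      let maxh := match maxh with
        | none => some h
        | some m => if h > m then some h else maxh
      let succ := (edges.filter (fun e => e.1 == node)).map (fun e => e.2)
                  ++ (edges.filter (fun e => e.2 == node)).map (fun e => e.1)
      -- the for-loop appends (s, h+1) for each s not in visited (visited unchanged inside it)
      let explore := rest ++ (succ.filter (fun s => !(visited.contains s))).map (fun s => (s, h + 1))
      pvHeightLoopA edges fuel explore visited maxh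

def pvHeightA (root : Int) (edges : List (Int × Int)) : Int :=
  -- the queue starts nonempty, so the -inf sentinel is never returned; `.getD 0` only
  -- gives the Option a default to leave the Int type
  (pvHeightLoopA edges (pvFuel edges) [(root, 0)] PySem.Dict.empty none).getD 0

-- loop body of A's main loop: running minimum (None = float('inf')) plus collected roots
def pvMinStep (edges : List (Int × Int)) (acc : Option Int × List Int) (i : Int) :
    Option Int × List Int :=
  let curh := pvHeightA i edges
  match acc.1 with
  | none => (some curh, [i])              -- curh < inf always
  | some mh =>
    if curh < mh then (some curh, [i])
    else if curh == mh then (acc.1, acc.2 ++ [i])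
    else acc

def minimum_rooted_tree (nodes : Int) (edges : List (Int × Int)) : List Int :=
  ((PySem.List.pyRange 0 nodes 1).foldl (pvMinStep edges) (none, [])).2

-- ===== PORT B =====
-- out_adj.setdefault(a, []).append(b)  ==  out_adj[a] = out_adj.get(a, []) + [b]
def pvOutAdj (edges : List (Int × Int)) : PySem.Dict Int (List Int) :=
  edges.foldl (fun d p => d.modify p.1 [] (· ++ [p.2])) PySem.Dict.empty

def pvInAdj (edges : List (Int × Int)) : PySem.Dict Int (List Int) :=
  edges.foldl (fun d p => d.modify p.2 [] (· ++ [p.1])) PySem.Dict.empty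

-- B's `while i < len(queue)` cursor walks the queue front-to-back: ported as consuming
-- the list head while appending at the back
def pvEccLoop (outAdj inAdj : PySem.Dict Int (List Int)) :
    Nat → List (Int × Int) → PySem.Set Int → Int → Int
  | 0, _, _, best => best
  | fuel + 1, queue, visited, best =>
    match queue with
    | [] => best
    | (node, h) :: rest =>
      let visited := PySem.Set.add visited node
      let best := if h > best then h else best
      let succ := outAdj.getD node [] ++ inAdj.getD node []
      let queue := rest ++ (succ.filter (fun s => !(PySem.Set.contains visited s))).map (fun s => (s, h + 1))
      pvEccLoop outAdj inAdj fuel queue visited best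

def minimum_rooted_tree_alt (nodes : Int) (edges : List (Int × Int)) : List Int :=
  let outAdj := pvOutAdj edges
  let inAdj := pvInAdj edges
  if nodes ≤ 0 then []
  else
    let heights := (PySem.List.pyRange 0 nodes 1).map
      (fun r => pvEccLoop outAdj inAdj (pvFuel edges) [(r, 0)] PySem.Set.empty 0)
    let m := (PySem.List.min? heights (fun h => h)).getD 0
    ((PySem.List.enumerate heights 0).filter (fun p => p.2 == m)).map (fun p => p.1)

-- ===== PRECONDITION & SPEC =====
def Spec_minimum_rooted_tree (nodes : Int) (edges : List (Int × Int)) (out : List Int) : Prop := out = minimum_rooted_tree_alt nodes edges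
instance (nodes : Int) (edges : List (Int × Int)) (out : List Int) : Decidable (Spec_minimum_rooted_tree nodes edges out) := by unfold Spec_minimum_rooted_tree; infer_instance

-- ===== CLAIM (what is proved, stated in full; the proofs are below) =====
def Claim_equal_minimum_rooted_tree : Prop := ∀ (nodes : Int) (edges : List (Int × Int)), Dom_minimum_rooted_tree nodes edges → Spec_minimum_rooted_tree nodes edges (minimum_rooted_tree nodes edges)

-- ===== LEMMAS AND PROOFS =====

lemma pv_adjOut (edges : List (Int × Int)) (c : Int) :
    (pvOutAdj edges).getD c [] = (edges.filter (fun e => e.1 == c)).map (fun e => e.2) := by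
  unfold pvOutAdj
  rw [PySem.Dict.getD_foldl_modify_append]
  simp
lemma pv_adjIn (edges : List (Int × Int)) (c : Int) :
    (pvInAdj edges).getD c [] = (edges.filter (fun e => e.2 == c)).map (fun e => e.1) := by
  unfold pvInAdj
  have h : edges.foldl (fun d p => d.modify p.2 [] (· ++ [p.1])) PySem.Dict.empty
      = (edges.map Prod.swap).foldl (fun d p => d.modify p.1 [] (· ++ [p.2])) PySem.Dict.empty := by
    rw [List.foldl_map]
    simp [Prod.swap]
  rw [h, PySem.Dict.getD_foldl_modify_append]
  simp [List.filter_map, Function.comp_def, List.map_map]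
lemma pv_rel_insert (visD : PySem.Dict Int Int) (visS : PySem.Set Int) (node : Int)
    (hrel : ∀ s : Int, visD.contains s = PySem.Set.contains visS s) :
    ∀ s : Int, (visD.insert node 1).contains s = PySem.Set.contains (PySem.Set.add visS node) s := by
  intro s
  rw [PySem.Dict.contains_insert]
  have h2 : PySem.Set.contains (PySem.Set.add visS node) s = ((s == node) || PySem.Set.contains visS s) := by
    simp [PySem.Set.contains, PySem.Set.mem_add]
    rw [Bool.or_comm]
    congr 1
  rw [h2, hrel]
lemma pv_loop_rel (edges : List (Int × Int)) :
    ∀ (fuel : Nat) (queue : List (Int × Int)) (visD : PySem.Dict Int Int) (visS : PySem.Set Int)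
      (m : Int), (∀ s : Int, visD.contains s = PySem.Set.contains visS s) →
      pvHeightLoopA edges fuel queue visD (some m)
        = some (pvEccLoop (pvOutAdj edges) (pvInAdj edges) fuel queue visS m) := by
  intro fuel
  induction fuel with
  | zero => intro queue visD visS m _; simp [pvHeightLoopA, pvEccLoop]
  | succ f ih =>
    intro queue visD visS m hrel
    match queue with
    | [] => simp [pvHeightLoopA, pvEccLoop]
    | (node, h) :: rest =>
      simp only [pvHeightLoopA, pvEccLoop]
      have hsucc : (edges.filter (fun e => e.1 == node)).map (fun e => e.2)
                  ++ (edges.filter (fun e => e.2 == node)).map (fun e => e.1)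
          = (pvOutAdj edges).getD node [] ++ (pvInAdj edges).getD node [] := by
        rw [pv_adjOut, pv_adjIn]
      have hfilter : (fun s => !(visD.insert node 1).contains s)
          = (fun s => !(PySem.Set.contains (PySem.Set.add visS node) s)) := by
        funext s; rw [pv_rel_insert visD visS node hrel s]
      rw [hsucc, hfilter]
      by_cases hc : h > m
      · simp only [if_pos hc]; exact ih _ _ _ _ (pv_rel_insert visD visS node hrel)
      · simp only [if_neg hc]; exact ih _ _ _ _ (pv_rel_insert visD visS node hrel)
lemma pv_height_eq (edges : List (Int × Int)) (root : Int) :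
    pvHeightA root edges
      = pvEccLoop (pvOutAdj edges) (pvInAdj edges) (pvFuel edges) [(root, 0)] PySem.Set.empty 0 := by
  obtain ⟨f, hf⟩ : ∃ f, pvFuel edges = f + 1 :=
    ⟨2 ^ (2 * edges.length + 2) - 1, by
      have : 0 < 2 ^ (2 * edges.length + 2) := Nat.two_pow_pos _
      unfold pvFuel
      omega⟩
  unfold pvHeightA
  rw [hf]
  simp only [pvHeightLoopA, pvEccLoop]
  have hsucc : (edges.filter (fun e => e.1 == root)).map (fun e => e.2)
              ++ (edges.filter (fun e => e.2 == root)).map (fun e => e.1)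
      = (pvOutAdj edges).getD root [] ++ (pvInAdj edges).getD root [] := by
    rw [pv_adjOut, pv_adjIn]
  have hfilter : (fun s => !(PySem.Dict.empty.insert root (1:Int)).contains s)
      = (fun s => !(PySem.Set.contains (PySem.Set.add PySem.Set.empty root) s)) := by
    funext s
    rw [pv_rel_insert PySem.Dict.empty PySem.Set.empty root
      (fun s => by simp [PySem.Dict.contains_empty, PySem.Set.contains, PySem.Set.empty]) s]
  rw [hsucc, hfilter,
    pv_loop_rel edges f _ _ _ 0
      (pv_rel_insert PySem.Dict.empty PySem.Set.empty root
        (fun s => by simp [PySem.Dict.contains_empty, PySem.Set.contains, PySem.Set.empty]))]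
  simp
lemma pv_foldl_min_eq_iff (c : Int) (xs : List Int) :
    xs.foldl min c = c ↔ ∀ y ∈ xs, c ≤ y := by
  constructor
  · intro h y hy
    have := (PySem.List.foldl_min_le xs c).2 y hy
    omega
  · intro h
    rcases PySem.List.foldl_min_mem xs c with h1 | h1
    · exact h1
    · have h2 := (PySem.List.foldl_min_le xs c).1
      have := h _ h1
      omega
lemma pv_head_min (c : Int) (t : List Int) (g : Int → Int) :
    (t.all (fun j => decide (c ≤ g j))) = (c == (t.map g).foldl min c) := by
  by_cases h : ∀ j ∈ t, c ≤ g j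
  · have hfold : (t.map g).foldl min c = c := by
      rw [pv_foldl_min_eq_iff]
      intro y hy
      obtain ⟨j, hj, rfl⟩ := List.mem_map.mp hy
      exact h j hj
    simp only [hfold, beq_self_eq_true]
    simp only [List.all_eq_true, decide_eq_true_eq]
    exact h
  · have hfold : (t.map g).foldl min c ≠ c := by
      intro hc
      refine h (fun j hj => ?_)
      exact (pv_foldl_min_eq_iff c (t.map g)).1 hc (g j) (List.mem_map.mpr ⟨j, hj, rfl⟩)
    have hbeq : (c == (t.map g).foldl min c) = false := beq_eq_false_iff_ne.mpr (Ne.symm hfold)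
    rw [hbeq]
    simp only [List.all_eq_false, decide_eq_true_eq]
    push Not at h
    obtain ⟨j, hj, hlt⟩ := h
    exact ⟨j, hj, by simpa using hlt⟩
lemma pv_fold_some (edges : List (Int × Int)) :
    ∀ (l : List Int) (m : Int) (pre : List Int),
      l.foldl (pvMinStep edges) (some m, pre)
        = (some ((l.map (fun i => pvHeightA i edges)).foldl min m),
           (if l.all (fun i => decide (m ≤ pvHeightA i edges)) then pre else [])
             ++ l.filter (fun i => pvHeightA i edges == (l.map (fun i => pvHeightA i edges)).foldl min m)) := by
  intro l
  induction l with
  | nil => intro m pre; simp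
  | cons i t ih =>
    intro m pre
    rw [List.foldl_cons]
    rcases lt_trichotomy (pvHeightA i edges) m with hlt | heq | hgt
    · have hstep : pvMinStep edges (some m, pre) i = (some (pvHeightA i edges), [i]) := by
        simp [pvMinStep, hlt]
      rw [hstep, ih]
      have hmin : min m (pvHeightA i edges) = pvHeightA i edges := by omega
      simp only [List.map_cons, List.foldl_cons, List.all_cons, List.filter_cons, hmin]
      have hall : decide (m ≤ pvHeightA i edges) = false := by simp; omega
      simp only [hall, Bool.false_and, Bool.false_eq_true, if_false]
      rw [pv_head_min (pvHeightA i edges) t (fun i => pvHeightA i edges)]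
      by_cases hc : (pvHeightA i edges == (t.map (fun i => pvHeightA i edges)).foldl min (pvHeightA i edges)) = true
      · simp [hc]
      · simp [hc]
    · have hstep : pvMinStep edges (some m, pre) i = (some m, pre ++ [i]) := by
        simp [pvMinStep, heq]
      rw [hstep, ih]
      have hmin : min m (pvHeightA i edges) = m := by omega
      simp only [List.map_cons, List.foldl_cons, List.all_cons, List.filter_cons, hmin]
      have hall : decide (m ≤ pvHeightA i edges) = true := by simp; omega
      simp only [hall, Bool.true_and]
      rw [pv_head_min m t (fun i => pvHeightA i edges), heq]
      by_cases hc : (m == (t.map (fun i => pvHeightA i edges)).foldl min m) = true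
      · simp [hc]
      · simp [hc]
    · have hne1 : ¬ (pvHeightA i edges < m) := by omega
      have hne2 : (pvHeightA i edges == m) = false := by simp; omega
      have hstep : pvMinStep edges (some m, pre) i = (some m, pre) := by
        simp [pvMinStep, hne1, hne2]
      rw [hstep, ih]
      have hmin : min m (pvHeightA i edges) = m := by omega
      simp only [List.map_cons, List.foldl_cons, List.all_cons, List.filter_cons, hmin]
      have hall : decide (m ≤ pvHeightA i edges) = true := by simp; omega
      simp only [hall, Bool.true_and]
      have hMle := (PySem.List.foldl_min_le (t.map (fun i => pvHeightA i edges)) m).1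
      have hhead : (pvHeightA i edges == (t.map (fun i => pvHeightA i edges)).foldl min m) = false := by
        simp; omega
      simp [hhead]
lemma pv_argmin_list (edges : List (Int × Int)) (a : Int) (t : List Int) :
    ((a :: t).foldl (pvMinStep edges) (none, [])).2
      = (a :: t).filter
          (fun i => pvHeightA i edges == (t.map (fun i => pvHeightA i edges)).foldl min (pvHeightA a edges)) := by
  rw [List.foldl_cons]
  have hstep : pvMinStep edges (none, []) a = (some (pvHeightA a edges), [a]) := by
    simp [pvMinStep]
  rw [hstep, pv_fold_some]
  simp only [List.filter_cons]
  rw [pv_head_min (pvHeightA a edges) t (fun i => pvHeightA i edges)]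
  by_cases hc : (pvHeightA a edges == (t.map (fun i => pvHeightA i edges)).foldl min (pvHeightA a edges)) = true
  · simp [hc]
  · simp [hc]

-- ===== VERDICT (by name: the statement is the Claim_ definition above) =====
theorem minimum_rooted_tree_spec : Claim_equal_minimum_rooted_tree := by
  intro nodes edges _
  show minimum_rooted_tree nodes edges = minimum_rooted_tree_alt nodes edges
  unfold minimum_rooted_tree minimum_rooted_tree_alt
  by_cases hn : nodes ≤ 0
  · simp [PySem.List.pyRange_one_eq_nil hn, hn]
  · push Not at hn
    simp only [if_neg (by omega : ¬ nodes ≤ 0)]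
    have hecc : (fun r => pvEccLoop (pvOutAdj edges) (pvInAdj edges) (pvFuel edges) [(r, 0)] PySem.Set.empty 0)
        = (fun r => pvHeightA r edges) := funext fun r => (pv_height_eq edges r).symm
    rw [hecc]
    have hL : PySem.List.pyRange 0 nodes 1 = 0 :: PySem.List.pyRange 1 nodes 1 := by
      have := PySem.List.pyRange_one_cons (a := 0) (b := nodes) (by omega)
      simpa using this
    rw [hL]
    rw [pv_argmin_list]
    set g : Int → Int := fun i => pvHeightA i edges with hg
    set t := PySem.List.pyRange 1 nodes 1 with ht
    simp only [List.map_cons]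
    rw [PySem.List.min?_id_cons]
    simp only [Option.getD_some]
    set M := (t.map g).foldl min (g 0) with hM
    rw [show g 0 :: List.map g t = List.map g (0 :: t) from rfl, ← hL]
    have hlen : PySem.List.len ((PySem.List.pyRange 0 nodes 1).map g) = nodes := by
      simp [PySem.List.length_pyRange_one]
      omega
    rw [PySem.List.enumerate_eq_map_pyRange _ (0 : Int), hlen]
    rw [List.filter_map, List.map_map]
    have hcong : ∀ j ∈ PySem.List.pyRange 0 nodes 1,
        ((fun p => p.2 == M) ∘ (fun j => (j, PySem.List.pyGetD ((PySem.List.pyRange 0 nodes 1).map g) j 0))) j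
          = (g j == M) := by
      intro j hj
      obtain ⟨h0, h1⟩ := (PySem.List.mem_pyRange_one).mp hj
      simp only [Function.comp]
      rw [PySem.List.pyGetD_map_pyRange_of_nonneg g nodes j 0 h0 h1]
    rw [List.filter_congr hcong]
    simp [Function.comp_def, hg]
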